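-- pv_equiv track=rewrite | github.com/RybakovaIE/aois | lab3.py | is_excess
-- ===== SOURCE A (Python) =====
-- def is_excess(pair, pairs):
--     first_find = False
--     second_find = False
--     for other in pairs:
--         if other != pair:
--             if other[1] == pair[0] or other[0] == pair[0]:
--                 first_find = True
--             if other[0] == pair[1] or other[1] == pair[1]:
--                 second_find = True
--     return first_find and second_find
-- ===== SOURCE B (Python) =====
-- def is_excess(pair, pairs):
--     counts = {}
--     for a, b in pairs:
--         counts[a] = counts.get(a, 0) + 1
--         counts[b] = counts.get(b, 0) + 1
--     dup = pairs.count(pair)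
--     need = dup * (2 if pair[0] == pair[1] else 1)
--     return counts.get(pair[0], 0) > need and counts.get(pair[1], 0) > need
-- ===== Notes on version B (the rewrite author's own statement) =====
-- stated objective: alternative
-- what changed: Replaces A's existential scan with two exclusion flags by a counting argument: build a frequency dict of all coordinates (including the copies of pair itself), then decide arithmetically whether each endpoint's total count exceeds the contribution of the dup copies of pair.
import Mathlib
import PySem

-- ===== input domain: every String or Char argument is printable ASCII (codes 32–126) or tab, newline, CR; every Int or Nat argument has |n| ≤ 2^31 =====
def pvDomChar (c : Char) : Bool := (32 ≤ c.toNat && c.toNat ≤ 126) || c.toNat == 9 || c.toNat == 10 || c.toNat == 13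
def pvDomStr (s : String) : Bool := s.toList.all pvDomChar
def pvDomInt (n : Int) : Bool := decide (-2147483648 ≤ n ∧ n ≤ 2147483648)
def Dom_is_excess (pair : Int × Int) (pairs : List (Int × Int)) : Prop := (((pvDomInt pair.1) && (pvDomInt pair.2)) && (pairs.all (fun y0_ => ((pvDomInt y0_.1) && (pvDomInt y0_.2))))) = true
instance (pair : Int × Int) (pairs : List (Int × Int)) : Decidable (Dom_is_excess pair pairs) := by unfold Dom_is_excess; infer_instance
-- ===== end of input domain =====

-- B replaces A's existential scan (two exclusion flags) by a counting argument: a frequency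
-- dict of all coordinates, then an arithmetic comparison against the contribution of the
-- copies of pair itself (objective: alternative).

-- ===== PORT A =====
-- for other in pairs: update (first_find, second_find)
def is_excess (pair : Int × Int) (pairs : List (Int × Int)) : Bool :=
  let st := pairs.foldl
    (fun (st : Bool × Bool) other =>
      if other ≠ pair then
        ((if other.2 == pair.1 || other.1 == pair.1 then true else st.1),
         (if other.1 == pair.2 || other.2 == pair.2 then true else st.2))
      else st)
    (false, false)
  st.1 && st.2

-- ===== PORT B =====
-- counts = {}; for a, b in pairs: counts[a] = counts.get(a,0)+1; counts[b] = counts.get(b,0)+1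
-- dup = pairs.count(pair); need = dup * (2 if pair[0]==pair[1] else 1)
-- return counts.get(pair[0],0) > need and counts.get(pair[1],0) > need
def is_excess_alt (pair : Int × Int) (pairs : List (Int × Int)) : Bool :=
  let counts : PySem.Dict Int Int := pairs.foldl
    (fun c o => (c.modify o.1 0 (· + 1)).modify o.2 0 (· + 1))
    PySem.Dict.empty
  let dup : Int := (pairs.count pair : Nat)
  let need : Int := dup * (if pair.1 == pair.2 then 2 else 1)
  decide (need < counts.getD pair.1 0) && decide (need < counts.getD pair.2 0)

-- ===== PRECONDITION & SPEC =====
def Spec_is_excess (pair : Int × Int) (pairs : List (Int × Int)) (out : Bool) : Prop := out = is_excess_alt pair pairs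
instance (pair : Int × Int) (pairs : List (Int × Int)) (out : Bool) : Decidable (Spec_is_excess pair pairs out) := by unfold Spec_is_excess; infer_instance

-- ===== CLAIM (what is proved, stated in full; the proofs are below) =====
def Claim_equal_is_excess : Prop := ∀ (pair : Int × Int) (pairs : List (Int × Int)), Dom_is_excess pair pairs → Spec_is_excess pair pairs (is_excess pair pairs)

-- ===== LEMMAS AND PROOFS =====

-- A's fold: each flag is the initial flag OR-ed with an 'any' over the list.
theorem is_excess_fold_A (pair : Int × Int) (pairs : List (Int × Int)) (st : Bool × Bool) :
    pairs.foldl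
      (fun (st : Bool × Bool) other =>
        if other ≠ pair then
          ((if other.2 == pair.1 || other.1 == pair.1 then true else st.1),
           (if other.1 == pair.2 || other.2 == pair.2 then true else st.2))
        else st)
      st
    = (st.1 || pairs.any (fun o => o ≠ pair && (o.2 == pair.1 || o.1 == pair.1)),
       st.2 || pairs.any (fun o => o ≠ pair && (o.1 == pair.2 || o.2 == pair.2))) := by
  induction pairs generalizing st with
  | nil => simp
  | cons o rest ih =>
    simp only [List.foldl_cons, List.any_cons, ih]
    by_cases h : o = pair
    · simp [h]
    · rcases st with ⟨a, b⟩
      simp only [h, ne_eq, not_false_eq_true, if_true, decide_true, Bool.true_and,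
        Prod.mk.injEq]
      constructor <;> (split_ifs with hc <;> simp [hc])

-- B's fold over pairs equals the Counter of the flattened coordinate list.
theorem is_excess_fold_B (pairs : List (Int × Int)) (c : PySem.Dict Int Int) :
    pairs.foldl (fun c (o : Int × Int) => (c.modify o.1 0 (· + 1)).modify o.2 0 (· + 1)) c
    = (pairs.flatMap (fun o => [o.1, o.2])).foldl (fun c x => c.modify x 0 (· + 1)) c := by
  induction pairs generalizing c with
  | nil => rfl
  | cons o rest ih => simp [List.foldl_cons, ih]

-- counting split: coordinate occurrences of x = dup copies of pair's own contribution + others'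
theorem coord_count_split (pair : Int × Int) (pairs : List (Int × Int)) (x : Int) :
    (pairs.flatMap (fun o => [o.1, o.2])).count x
    = pairs.count pair * ([pair.1, pair.2].count x)
      + ((pairs.filter (fun o => o ≠ pair)).flatMap (fun o => [o.1, o.2])).count x := by
  induction pairs with
  | nil => simp
  | cons o rest ih =>
    by_cases h : o = pair
    · subst h
      simp [List.count_cons, ih]
      ring
    · simp [List.count_cons, ih, h]
      ring

-- the arithmetic core: the count threshold is exceeded iff some other pair contains x
theorem count_threshold_iff (pair : Int × Int) (pairs : List (Int × Int)) (x : Int)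
    (hx : x = pair.1 ∨ x = pair.2) :
    ((pairs.count pair : Int) * (if pair.1 = pair.2 then 2 else 1)
      < ((pairs.flatMap (fun o => [o.1, o.2])).count x : Int))
    ↔ ∃ o ∈ pairs, o ≠ pair ∧ (o.1 = x ∨ o.2 = x) := by
  have hw : [pair.1, pair.2].count x = (if pair.1 = pair.2 then 2 else 1) := by
    rcases hx with rfl | rfl <;> by_cases h : pair.1 = pair.2 <;> simp [h]
  rw [coord_count_split pair pairs x, hw]
  have hmem : (0 < ((pairs.filter (fun o => o ≠ pair)).flatMap (fun o => [o.1, o.2])).count x)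
      ↔ ∃ o ∈ pairs, o ≠ pair ∧ (o.1 = x ∨ o.2 = x) := by
    rw [List.count_pos_iff]
    simp only [List.mem_flatMap, List.mem_filter, List.mem_cons, List.not_mem_nil, or_false,
      ne_eq, decide_eq_true_eq]
    constructor
    · rintro ⟨o, ⟨ho, hne⟩, hx'⟩
      exact ⟨o, ho, hne, by tauto⟩
    · rintro ⟨o, ho, hne, hx'⟩
      exact ⟨o, ⟨ho, hne⟩, by tauto⟩
  rw [← hmem]
  by_cases h : pair.1 = pair.2 <;> simp only [h, if_true, if_false] <;>
    push_cast <;> omega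

-- ===== VERDICT (by name: the statement is the Claim_ definition above) =====
theorem is_excess_spec : Claim_equal_is_excess := by
  intro pair pairs _
  unfold Spec_is_excess is_excess is_excess_alt
  simp only [is_excess_fold_A]
  rw [is_excess_fold_B pairs PySem.Dict.empty, ← PySem.Dict.counter_eq_foldl]
  simp only [PySem.Dict.getD_counter]
  rw [Bool.eq_iff_iff]
  simp only [Bool.and_eq_true, Bool.or_eq_true, Bool.false_or, List.any_eq_true,
    decide_eq_true_eq, beq_iff_eq, ne_eq, Bool.and_eq_true]
  rw [count_threshold_iff pair pairs pair.1 (Or.inl rfl),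
      count_threshold_iff pair pairs pair.2 (Or.inr rfl)]
  constructor <;> rintro ⟨⟨o, ho, h1, h2⟩, ⟨p, hp, h3, h4⟩⟩ <;>
    exact ⟨⟨o, ho, h1, by tauto⟩, ⟨p, hp, h3, by tauto⟩⟩
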